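-- pv_equiv track=rewrite | github.com/coveo-labs/create-a-pilot-catalog | ENDECA_2_createPages.py | splitSpace
-- ===== SOURCE A (Python) =====
-- def splitSpace(prod):
--   try:
--     parts=prod.split(' ')
--     newparts = ''
--     for nr in range(1,len(parts)):
--       newparts+=prod.replace(' ','',nr)+';'
--     return newparts
--   except:
--     return ''
-- ===== SOURCE B (Python) =====
-- def splitSpace(prod):
--   parts = prod.split(' ')
--   res = []
--   for nr in range(1, len(parts)):
--     s = ''.join(parts[:nr + 1])
--     tail = parts[nr + 1:]
--     if tail:
--       s += ' ' + ' '.join(tail)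
--     res.append(s + ';')
--   return ''.join(res)
-- ===== Notes on version B (the rewrite author's own statement) =====
-- stated objective: alternative
-- what changed: B splits prod into tokens once and rebuilds each output from the token list (first nr+1 tokens concatenated, rest space-joined, collected and joined at the end) instead of re-scanning prod with replace(' ','',nr) on every iteration.
import Mathlib
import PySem

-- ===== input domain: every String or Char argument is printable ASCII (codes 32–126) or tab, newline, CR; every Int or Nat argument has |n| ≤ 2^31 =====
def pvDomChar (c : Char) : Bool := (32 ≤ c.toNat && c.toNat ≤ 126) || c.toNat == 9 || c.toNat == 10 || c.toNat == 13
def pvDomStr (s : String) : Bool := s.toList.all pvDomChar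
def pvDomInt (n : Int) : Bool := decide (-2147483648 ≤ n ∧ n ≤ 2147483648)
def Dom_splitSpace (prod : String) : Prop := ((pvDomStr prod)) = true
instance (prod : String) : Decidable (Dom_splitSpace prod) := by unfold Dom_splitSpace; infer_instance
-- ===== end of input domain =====

-- B rebuilds each output string from the token list of a single split instead of
-- re-scanning prod with replace(' ','',nr) each iteration (alternative decomposition, same cost).


-- ===== PORT A =====
-- hand port of prod.replace(' ', '', nr): remove the first n occurrences of ' '
-- (exact: new = '' so replacement is deletion, scanning left to right, at most n times;
--  PySem.Chars.replace has no count parameter, hence the hand port).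
def removeSpacesN : List Char → Nat → List Char
  | cs, 0 => cs
  | [], _ + 1 => []
  | c :: cs, n + 1 => if c = ' ' then removeSpacesN cs n else c :: removeSpacesN cs (n + 1)

-- A: parts = prod.split(' '); for nr in range(1, len(parts)): newparts += prod.replace(' ','',nr) + ';'
-- (the try/except never fires: every operation is total on a string argument).
-- nr ranges over 1 ≤ nr, so nr.toNat is exact.
def splitSpace (prod : String) : String :=
  let parts := PySem.Chars.splitOn prod.toList [' ']
  let newparts := (PySem.List.pyRange 1 (parts.length : Int) 1).foldl
    (fun acc nr => acc ++ removeSpacesN prod.toList nr.toNat ++ [';']) ([] : List Char)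
  String.ofList newparts

-- ===== PORT B =====
-- B's loop body: s = ''.join(parts[:nr+1]); if parts[nr+1:]: s += ' ' + ' '.join(parts[nr+1:])
-- (slices parts[:nr+1] / parts[nr+1:] with nr+1 ≥ 0 are List.take / List.drop, exact here).
def bPiece (parts : List (List Char)) (n : Nat) : List Char :=
  let s := PySem.Chars.join [] (parts.take (n + 1))
  let tail := parts.drop (n + 1)
  if tail = [] then s else s ++ [' '] ++ PySem.Chars.join [' '] tail

-- B: parts = prod.split(' '); per nr collect (s + ';') into res; return ''.join(res).
def splitSpace_alt (prod : String) : String :=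
  let parts := PySem.Chars.splitOn prod.toList [' ']
  let res := (PySem.List.pyRange 1 (parts.length : Int) 1).foldl
    (fun acc nr => acc ++ [bPiece parts nr.toNat ++ [';']]) ([] : List (List Char))
  String.ofList (PySem.Chars.join [] res)

-- ===== PRECONDITION & SPEC =====
def Spec_splitSpace (prod : String) (out : String) : Prop := out = splitSpace_alt prod
instance (prod : String) (out : String) : Decidable (Spec_splitSpace prod out) := by unfold Spec_splitSpace; infer_instance

-- ===== CLAIM (what is proved, stated in full; the proofs are below) =====
def Claim_equal_splitSpace : Prop := ∀ (prod : String), Dom_splitSpace prod → Spec_splitSpace prod (splitSpace prod)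

-- ===== LEMMAS AND PROOFS =====

-- single-character split on ' ', the simple structural form of Chars.splitOn _ [' ']
def split1 : List Char → List (List Char)
  | [] => [[]]
  | c :: cs =>
    if c = ' ' then [] :: split1 cs
    else
      match split1 cs with
      | p :: ps => (c :: p) :: ps
      | [] => [[c]]

-- append the first accumulated piece onto the head of the remaining split
def consHead (p : List Char) : List (List Char) → List (List Char)
  | [] => [p]
  | q :: qs => (p ++ q) :: qs

theorem split1_ne_nil (cs : List Char) : split1 cs ≠ [] := by
  cases cs with
  | nil => simp [split1]
  | cons c cs =>
    simp only [split1]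
    split_ifs with h
    · simp
    · cases h' : split1 cs <;> simp

theorem go_eq_split1 (fuel : Nat) (l cur : List Char) (acc : List (List Char))
    (h : l.length ≤ fuel) :
    PySem.Chars.splitOn.go [' '] fuel l cur acc
      = acc.reverse ++ consHead cur.reverse (split1 l) := by
  induction fuel generalizing l cur acc with
  | zero =>
    have : l = [] := by cases l <;> simp_all
    subst this
    simp [PySem.Chars.splitOn.go, split1, consHead]
  | succ fuel ih =>
    cases l with
    | nil => simp [PySem.Chars.splitOn.go, split1, consHead]
    | cons c rest =>
      by_cases hc : c = ' '
      · subst hc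
        rw [show PySem.Chars.splitOn.go [' '] (fuel+1) (' ' :: rest) cur acc
            = PySem.Chars.splitOn.go [' '] fuel rest [] (cur.reverse :: acc) by
          simp [PySem.Chars.splitOn.go, List.isPrefixOf]]
        rw [ih rest [] (cur.reverse :: acc) (by simpa using Nat.le_of_succ_le_succ h)]
        cases h' : split1 rest with
        | nil => exact absurd h' (split1_ne_nil rest)
        | cons q qs => simp [split1, consHead, h']
      · rw [show PySem.Chars.splitOn.go [' '] (fuel+1) (c :: rest) cur acc
            = PySem.Chars.splitOn.go [' '] fuel rest (c :: cur) acc by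
          simp [PySem.Chars.splitOn.go, List.isPrefixOf, Ne.symm hc]]
        rw [ih rest (c :: cur) acc (by simpa using Nat.le_of_succ_le_succ h)]
        cases h' : split1 rest with
        | nil => exact absurd h' (split1_ne_nil rest)
        | cons q qs => simp [split1, consHead, h', hc]

theorem splitOn_eq_split1 (cs : List Char) :
    PySem.Chars.splitOn cs [' '] = split1 cs := by
  rw [PySem.Chars.splitOn, go_eq_split1 _ _ _ _ (by omega)]
  cases h' : split1 cs with
  | nil => exact absurd h' (split1_ne_nil cs)
  | cons q qs => simp [consHead]

theorem join_nil_eq_flatten (xs : List (List Char)) :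
    PySem.Chars.join [] xs = xs.flatten := by
  induction xs with
  | nil => simp [PySem.Chars.join_nil]
  | cons x xs ih =>
    cases xs with
    | nil => simp [PySem.Chars.join_singleton]
    | cons y ys => rw [PySem.Chars.join_cons_cons, List.flatten_cons, ← ih]; simp

theorem join_split1 (cs : List Char) :
    PySem.Chars.join [' '] (split1 cs) = cs := by
  induction cs with
  | nil => simp [split1, PySem.Chars.join_singleton]
  | cons c cs ih =>
    cases h' : split1 cs with
    | nil => exact absurd h' (split1_ne_nil cs)
    | cons q qs =>
      rw [h'] at ih
      by_cases hc : c = ' '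
      · subst hc
        rw [show split1 (' ' :: cs) = [] :: q :: qs by simp [split1, h']]
        rw [PySem.Chars.join_cons_cons, ih]; simp
      · rw [show split1 (c :: cs) = (c :: q) :: qs by simp [split1, hc, h']]
        cases qs with
        | nil => rw [PySem.Chars.join_singleton] at ih ⊢; rw [ih]
        | cons r rs =>
          rw [PySem.Chars.join_cons_cons] at ih ⊢
          rw [← ih]; simp

theorem join_cons_ne_nil (q : List Char) (qs : List (List Char)) (hqs : qs ≠ []) :
    PySem.Chars.join [' '] (q :: qs) = q ++ ' ' :: PySem.Chars.join [' '] qs := by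
  cases qs with
  | nil => exact absurd rfl hqs
  | cons r rs => rw [PySem.Chars.join_cons_cons]; simp

-- the heart: removing the first n spaces = gluing the first n+1 tokens
theorem removeSpacesN_eq_bPiece (cs : List Char) (n : Nat) :
    removeSpacesN cs n = bPiece (split1 cs) n := by
  induction cs generalizing n with
  | nil =>
    cases n <;>
      simp [removeSpacesN, split1, bPiece]
  | cons c cs ih =>
    by_cases hc : c = ' '
    · subst hc
      have h1 : split1 (' ' :: cs) = [] :: split1 cs := by simp [split1]
      cases n with
      | zero =>
        cases h' : split1 cs with
        | nil => exact absurd h' (split1_ne_nil cs)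
        | cons q qs =>
          have hj := join_split1 cs
          rw [h'] at hj
          simp only [removeSpacesN, bPiece, h1, h', List.take_succ_cons, List.take_zero,
            List.drop_succ_cons, List.drop_zero, join_nil_eq_flatten]
          simp [hj]
      | succ m =>
        simp only [removeSpacesN, bPiece, h1, List.take_succ_cons,
          List.drop_succ_cons]
        rw [ih m]
        simp [bPiece, join_nil_eq_flatten]
    · cases h' : split1 cs with
      | nil => exact absurd h' (split1_ne_nil cs)
      | cons p ps =>
        have h1 : split1 (c :: cs) = (c :: p) :: ps := by simp [split1, hc, h']
        cases n with
        | zero =>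
          have hj := join_split1 (c :: cs)
          rw [h1] at hj
          simp only [removeSpacesN, bPiece, h1, List.take_succ_cons, List.take_zero,
            List.drop_succ_cons, List.drop_zero, join_nil_eq_flatten]
          cases ps with
          | nil => rw [PySem.Chars.join_singleton] at hj; simp [hj]
          | cons r rs =>
            rw [join_cons_ne_nil _ _ (by simp)] at hj
            simp [← hj]
        | succ m =>
          simp only [removeSpacesN, if_neg hc, bPiece, h1, List.take_succ_cons,
            List.drop_succ_cons]
          rw [ih (m + 1)]
          simp only [bPiece, h', List.take_succ_cons, List.drop_succ_cons,
            join_nil_eq_flatten]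
          split_ifs <;> simp

-- both folds, run in step: A's string accumulator is the flattening of B's list accumulator
theorem fold_main (cs : List Char) (ns : List Int) (accA : List Char)
    (accB : List (List Char)) (h : accA = accB.flatten) :
    ns.foldl (fun acc nr => acc ++ removeSpacesN cs nr.toNat ++ [';']) accA
      = (ns.foldl (fun acc nr => acc ++ [bPiece (split1 cs) nr.toNat ++ [';']]) accB).flatten := by
  induction ns generalizing accA accB with
  | nil => simpa using h
  | cons n ns ih =>
    simp only [List.foldl_cons]
    exact ih _ _ (by simp [h, removeSpacesN_eq_bPiece])

-- ===== VERDICT (by name: the statement is the Claim_ definition above) =====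
theorem splitSpace_spec : Claim_equal_splitSpace := by
  intro prod _
  unfold Spec_splitSpace splitSpace splitSpace_alt
  simp only [splitOn_eq_split1, join_nil_eq_flatten]
  exact congrArg String.ofList (fold_main prod.toList _ [] [] rfl)
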